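-- pv_equiv track=rewrite | github.com/ColdWindScholar/dibao | rimg2sdat.py | SplitRangeSet
-- ===== SOURCE A (Python) =====
-- def SplitRangeSet(range_list, limit=0):
--     if limit > 0:
--         streams = [(range_list[i], range_list[i + 1]) for i in range(0, len(range_list), 2)]
--         commands = []
--         cmd_range = []
--
--         counter = limit
--         for begin, end in streams:
--             length = end - begin
--
--             while length > 0:
--                 if length > counter:
--                     cmd_range.append(begin)
--                     cmd_range.append(begin + counter)
--                     begin = begin + counter
--                     length -= counter
--                     counter = 0
--                 else:
--                     cmd_range.append(begin)
--                     cmd_range.append(end)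
--                     counter -= length
--                     length = 0
--
--                 if counter == 0:
--                     commands.append(tuple(cmd_range))
--                     cmd_range = []
--                     counter = limit
--         else:
--             if len(cmd_range) > 0:
--                 commands.append(tuple(cmd_range))
--
--         return commands
--     else:
--         return [tuple(range_list)]
-- ===== SOURCE B (Python) =====
-- def SplitRangeSet(range_list, limit=0):
--     if limit <= 0:
--         return [tuple(range_list)]
--     commands = []
--     cmd = []
--     pos = 0  # total length consumed so far; commands close at multiples of limit
--     for i in range(0, len(range_list), 2):
--         b, e = range_list[i], range_list[i + 1]
--         n = e - b
--         if n <= 0: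
--             continue
--         prev = b
--         # cut points fall where the global position crosses a multiple of limit
--         for k in range(pos // limit + 1, (pos + n) // limit + 1):
--             cut = b + (k * limit - pos)
--             commands.append(tuple(cmd + [prev, cut]))
--             cmd = []
--             prev = cut
--         if prev < e:
--             cmd.extend((prev, e))
--         pos += n
--     if cmd:
--         commands.append(tuple(cmd))
--     return commands
-- ===== Notes on version B (the rewrite author's own statement) =====
-- stated objective: alternative
-- what changed: Replaces A's greedy counter-decrement inner while-loop with closed-form computation of the cut points: each command boundary falls at a global multiple of limit, so B computes the cut indices per interval with floor division and emits commands at those arithmetic cut positions.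
import Mathlib
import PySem

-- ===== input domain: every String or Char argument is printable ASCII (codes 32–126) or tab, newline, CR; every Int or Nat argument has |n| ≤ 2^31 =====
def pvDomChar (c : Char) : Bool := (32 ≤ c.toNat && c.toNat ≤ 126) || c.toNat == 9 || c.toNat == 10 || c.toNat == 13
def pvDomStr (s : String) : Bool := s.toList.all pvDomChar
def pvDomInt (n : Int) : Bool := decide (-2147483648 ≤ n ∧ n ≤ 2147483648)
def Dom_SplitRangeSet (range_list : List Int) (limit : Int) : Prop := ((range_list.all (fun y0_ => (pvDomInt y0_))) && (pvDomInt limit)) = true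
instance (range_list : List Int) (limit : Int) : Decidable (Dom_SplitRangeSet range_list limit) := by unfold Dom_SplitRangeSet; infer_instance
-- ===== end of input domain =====

-- B replaces A's greedy counter-decrement inner while-loop by closed-form cut positions
-- (command boundaries are the global multiples of limit, found by floor division); same cost, different algorithm.

-- ===== PORT A =====
-- inner while-loop of A; fuel = length.toNat + 1 is enough iterations whenever limit > 0
-- (each pass either consumes counter ≥ 1 from length or sets length to 0); state (counter, cmd_range, commands)
def pvInnerA (limit : Int) : Nat → Int → Int → Int → Int → List Int → List (List Int) → Int × List Int × List (List Int)
  | 0, _b, _e, _len, counter, cmd, commands => (counter, cmd, commands)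
  | fuel+1, b, e, len, counter, cmd, commands =>
    if 0 < len then
      let s : Int × Int × Int × List Int :=
        if counter < len then (b + counter, len - counter, (0:Int), cmd ++ [b, b + counter])
        else (b, (0:Int), counter - len, cmd ++ [b, e])
      if s.2.2.1 = 0 then pvInnerA limit fuel s.1 e s.2.1 limit [] (commands ++ [s.2.2.2])
      else pvInnerA limit fuel s.1 e s.2.1 s.2.2.1 s.2.2.2 commands
    else (counter, cmd, commands)

def pvStepA (limit : Int) (st : Int × List Int × List (List Int)) (be : Int × Int) :
    Int × List Int × List (List Int) :=
  pvInnerA limit ((be.2 - be.1).toNat + 1) be.1 be.2 (be.2 - be.1) st.1 st.2.1 st.2.2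

def SplitRangeSet (range_list : List Int) (limit : Int) : List (List Int) :=
  if 0 < limit then
    let streams := (PySem.List.pyRange 0 range_list.length 2).map
      (fun i => (PySem.List.pyGetD range_list i 0, PySem.List.pyGetD range_list (i + 1) 0))
    let r := streams.foldl (pvStepA limit) (limit, [], [])
    if 0 < r.2.1.length then r.2.2 ++ [r.2.1] else r.2.2
  else [range_list]

-- ===== PORT B =====
-- one cut of B's inner for-loop over the cut indices k; state (commands, cmd, prev)
def pvCutB (b pos limit : Int) (st : List (List Int) × List Int × Int) (k : Int) :
    List (List Int) × List Int × Int :=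
  (st.1 ++ [st.2.1 ++ [st.2.2, b + (k * limit - pos)]], [], b + (k * limit - pos))

-- B's loop body for one interval (b, e); state (commands, cmd, pos)
def pvStepB (limit : Int) (st : List (List Int) × List Int × Int) (be : Int × Int) :
    List (List Int) × List Int × Int :=
  if be.2 - be.1 ≤ 0 then st
  else
    let r := (PySem.List.pyRange (PySem.Int.floordiv st.2.2 limit + 1)
        (PySem.Int.floordiv (st.2.2 + (be.2 - be.1)) limit + 1) 1).foldl
      (pvCutB be.1 st.2.2 limit) (st.1, st.2.1, be.1)
    (r.1, if r.2.2 < be.2 then r.2.1 ++ [r.2.2, be.2] else r.2.1, st.2.2 + (be.2 - be.1))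

def SplitRangeSet_alt (range_list : List Int) (limit : Int) : List (List Int) :=
  if limit ≤ 0 then [range_list]
  else
    let r := (PySem.List.pyRange 0 range_list.length 2).foldl
      (fun st i => pvStepB limit st (PySem.List.pyGetD range_list i 0, PySem.List.pyGetD range_list (i + 1) 0))
      ([], [], 0)
    if r.2.1 ≠ [] then r.1 ++ [r.2.1] else r.1

-- ===== PRECONDITION & SPEC =====
-- Pre_ excludes exactly the inputs on which Python A raises IndexError:
-- odd-length range_list with limit > 0 (range_list[i+1] is out of range for the last pair).
def Pre_SplitRangeSet (range_list : List Int) (limit : Int) : Prop :=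
  limit ≤ 0 ∨ range_list.length % 2 = 0
instance (range_list : List Int) (limit : Int) : Decidable (Pre_SplitRangeSet range_list limit) := by
  unfold Pre_SplitRangeSet; infer_instance

def pvWitness_SplitRangeSet : List Int × Int := ([0, 5, 7, 9], 3)

def Spec_SplitRangeSet (range_list : List Int) (limit : Int) (out : List (List Int)) : Prop := out = SplitRangeSet_alt range_list limit
instance (range_list : List Int) (limit : Int) (out : List (List Int)) : Decidable (Spec_SplitRangeSet range_list limit out) := by unfold Spec_SplitRangeSet; infer_instance

-- ===== CLAIM (what is proved, stated in full; the proofs are below) =====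
def Claim_equal_SplitRangeSet : Prop := ∀ (range_list : List Int) (limit : Int), Dom_SplitRangeSet range_list limit → Pre_SplitRangeSet range_list limit → Spec_SplitRangeSet range_list limit (SplitRangeSet range_list limit)

-- ===== LEMMAS AND PROOFS =====

lemma pv_foldl_congr {α β : Type} (f g : α → β → α) (h : ∀ st x, f st x = g st x) :
    ∀ (l : List β) (i : α), l.foldl f i = l.foldl g i := by
  intro l
  induction l with
  | nil => intro i; rfl
  | cons x xs ih => intro i; simp only [List.foldl_cons, h, ih]

-- per-interval correspondence: A's counter loop started with counter = limit - pos % limit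
-- equals B's arithmetic cut loop over k ∈ [pos/limit + 1, (pos + n)/limit + 1)
lemma pv_inner_eq (limit : Int) (hl : 0 < limit) :
    ∀ (fuel : Nat) (pos b e : Int) (cmd : List Int) (commands : List (List Int)),
      0 < e - b → (e - b).toNat < fuel →
      pvInnerA limit fuel b e (e - b) (limit - pos % limit) cmd commands =
        ((fun r : List (List Int) × List Int × Int =>
            (limit - (pos + (e - b)) % limit,
             if r.2.2 < e then r.2.1 ++ [r.2.2, e] else r.2.1, r.1))
          ((PySem.List.pyRange (pos / limit + 1) ((pos + (e - b)) / limit + 1) 1).foldl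
            (pvCutB b pos limit) (commands, cmd, b))) := by
  intro fuel
  induction fuel with
  | zero => intro pos b e cmd commands hn hf; omega
  | succ fuel ih =>
    intro pos b e cmd commands hn hf
    have hr0 : 0 ≤ pos % limit := Int.emod_nonneg pos (by omega)
    have hr1 : pos % limit < limit := Int.emod_lt_of_pos pos hl
    have hde : limit * (pos / limit) + pos % limit = pos := Int.mul_ediv_add_emod pos limit
    by_cases hc : limit - pos % limit < e - b
    · -- A cuts: counter = limit - pos % limit, cut at b + counter
      have hmul : limit * (pos / limit + 1) = limit * (pos / limit) + limit := by ring
      have hmul2 : (pos / limit + 1) * limit = limit * (pos / limit) + limit := by ring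
      have hq2 : (pos + (limit - pos % limit)) = limit * (pos / limit + 1) := by omega
      have hcut : pos / limit + 1 < (pos + (e - b)) / limit + 1 := by
        have : pos / limit + 1 ≤ (pos + (e - b)) / limit := by
          rw [Int.le_ediv_iff_mul_le hl]; omega
        omega
      rw [PySem.List.pyRange_one_cons hcut]
      simp only [pvInnerA, if_pos hn, if_pos hc]
      simp only [List.foldl_cons]
      have hcutval : b + ((pos / limit + 1) * limit - pos) = b + (limit - pos % limit) := by omega
      -- next state for A
      have hlen2 : 0 < e - (b + (limit - pos % limit)) := by omega
      have hfu2 : (e - (b + (limit - pos % limit))).toNat < fuel := by omega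
      have hIH := ih (pos + (limit - pos % limit)) (b + (limit - pos % limit)) e
        ([]) (commands ++ [cmd ++ [b, b + (limit - pos % limit)]]) hlen2 hfu2
      have hpos2mod : (pos + (limit - pos % limit)) % limit = 0 := by
        rw [hq2]; exact Int.mul_emod_right limit _
      have hpos2div : (pos + (limit - pos % limit)) / limit = pos / limit + 1 := by
        rw [hq2]; exact Int.mul_ediv_cancel_left _ (by omega)
      rw [hpos2mod, hpos2div] at hIH
      simp only [sub_zero] at hIH
      rw [show e - b - (limit - pos % limit) = e - (b + (limit - pos % limit)) by ring] at *
      rw [hIH]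
      have hsum : pos + (limit - pos % limit) + (e - (b + (limit - pos % limit))) = pos + (e - b) := by ring
      rw [hsum]
      have hfc : ∀ st k, pvCutB (b + (limit - pos % limit)) (pos + (limit - pos % limit)) limit st k
          = pvCutB b pos limit st k := by
        intro st k
        have hck : b + (limit - pos % limit) + (k * limit - (pos + (limit - pos % limit))) = b + (k * limit - pos) := by ring
        simp only [pvCutB, hck]
      rw [pv_foldl_congr _ _ hfc]
      simp only [pvCutB, hcutval, if_true]
    · -- A finishes the interval: n ≤ counter
      have hn' : e - b ≤ limit - pos % limit := by omega
      by_cases heq : pos % limit + (e - b) = limit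
      · -- exact fill: counter' = 0, emit; B: one cut landing at e
        have hmul : limit * (pos / limit + 1) = limit * (pos / limit) + limit := by ring
        have hq' : pos + (e - b) = limit * (pos / limit + 1) := by omega
        have hdiv : (pos + (e - b)) / limit = pos / limit + 1 := by
          rw [hq']; exact Int.mul_ediv_cancel_left _ (by omega)
        have hmod : (pos + (e - b)) % limit = 0 := by
          rw [hq']; exact Int.mul_emod_right limit _
        rw [hdiv, hmod]
        rw [PySem.List.pyRange_one_cons (by omega), PySem.List.pyRange_one_eq_nil (by omega)]
        simp only [pvInnerA, if_pos hn, if_neg hc]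
        have hz : limit - pos % limit - (e - b) = 0 := by omega
        simp only [hz]
        have hmul2 : (pos / limit + 1) * limit = limit * (pos / limit) + limit := by ring
        have hcutval : b + ((pos / limit + 1) * limit - pos) = e := by omega
        cases fuel with
        | zero =>
            simp only [pvInnerA, List.foldl_cons, List.foldl_nil, pvCutB, hcutval]
            simp
        | succ f =>
            simp only [pvInnerA, List.foldl_cons, List.foldl_nil, pvCutB, hcutval]
            simp
      · -- partial fill: counter' > 0, no cut
        have hlt : pos % limit + (e - b) < limit := by omega
        have hdiv : (pos + (e - b)) / limit = pos / limit := by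
          have : pos + (e - b) = (pos % limit + (e - b)) + limit * (pos / limit) := by omega
          rw [this, Int.add_mul_ediv_left _ _ (by omega : limit ≠ 0),
            Int.ediv_eq_zero_of_lt (by omega) hlt]
          omega
        have hmod : (pos + (e - b)) % limit = pos % limit + (e - b) := by
          have h2 : pos + (e - b) = (pos % limit + (e - b)) + limit * (pos / limit) := by omega
          rw [h2, Int.add_mul_emod_self_left, Int.emod_eq_of_lt (by omega) hlt]
        rw [hdiv, hmod]
        rw [PySem.List.pyRange_one_eq_nil (by omega)]
        simp only [pvInnerA, if_pos hn, if_neg hc]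
        have hnz : ¬ (limit - pos % limit - (e - b) = 0) := by omega
        simp only [if_neg hnz]
        cases fuel with
        | zero =>
            simp only [pvInnerA, List.foldl_nil, Prod.mk.injEq]
            exact ⟨by omega, by simp [show b < e by omega]⟩
        | succ f =>
            simp only [pvInnerA, List.foldl_nil]
            simp only [if_neg (lt_irrefl (0:Int)), Prod.mk.injEq]
            exact ⟨by omega, by simp [show b < e by omega]⟩

lemma pv_outer_eq (limit : Int) (hl : 0 < limit) :
    ∀ (l : List (Int × Int)) (pos : Int) (cmd : List Int) (commands : List (List Int)),
      l.foldl (pvStepA limit) (limit - pos % limit, cmd, commands) =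
        ((fun r : List (List Int) × List Int × Int => (limit - r.2.2 % limit, r.2.1, r.1))
          (l.foldl (pvStepB limit) (commands, cmd, pos))) := by
  intro l
  induction l with
  | nil => intro pos cmd commands; rfl
  | cons be tl ih =>
    intro pos cmd commands
    simp only [List.foldl_cons]
    by_cases hn : be.2 - be.1 ≤ 0
    · have hA : pvStepA limit (limit - pos % limit, cmd, commands) be = (limit - pos % limit, cmd, commands) := by
        simp only [pvStepA, pvInnerA, if_neg (by omega : ¬ 0 < be.2 - be.1)]
      have hB : pvStepB limit (commands, cmd, pos) be = (commands, cmd, pos) := by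
        simp only [pvStepB, if_pos hn]
      rw [hA, hB, ih]
    · have hA : pvStepA limit (limit - pos % limit, cmd, commands) be =
          pvInnerA limit ((be.2 - be.1).toNat + 1) be.1 be.2 (be.2 - be.1) (limit - pos % limit) cmd commands := rfl
      rw [hA, pv_inner_eq limit hl _ pos be.1 be.2 cmd commands (by omega) (by omega)]
      have hB : pvStepB limit (commands, cmd, pos) be =
          ((fun r : List (List Int) × List Int × Int =>
            (r.1, if r.2.2 < be.2 then r.2.1 ++ [r.2.2, be.2] else r.2.1, pos + (be.2 - be.1)))
           ((PySem.List.pyRange (pos / limit + 1) ((pos + (be.2 - be.1)) / limit + 1) 1).foldl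
             (pvCutB be.1 pos limit) (commands, cmd, be.1))) := by
        simp only [pvStepB, if_neg hn, PySem.Int.floordiv_eq_ediv_of_pos hl]
      rw [hB, ih]
  -- (state relation: A's counter = limit - pos % limit)

-- ===== VERDICT (by name: the statement is the Claim_ definition above) =====
theorem SplitRangeSet_spec : Claim_equal_SplitRangeSet := by
  intro range_list limit _hdom _hpre
  unfold Spec_SplitRangeSet SplitRangeSet SplitRangeSet_alt
  by_cases hl : 0 < limit
  · rw [if_pos hl, if_neg (by omega : ¬ limit ≤ 0)]
    have hout := pv_outer_eq limit hl
      ((PySem.List.pyRange 0 range_list.length 2).map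
        (fun i => (PySem.List.pyGetD range_list i 0, PySem.List.pyGetD range_list (i + 1) 0))) 0 [] []
    simp only [Int.zero_emod, sub_zero, List.foldl_map] at hout
    simp only [List.foldl_map] at *
    rw [hout]
    set r := (PySem.List.pyRange 0 range_list.length 2).foldl
      (fun st i => pvStepB limit st (PySem.List.pyGetD range_list i 0, PySem.List.pyGetD range_list (i + 1) 0))
      ([], [], 0) with hr
    by_cases hc : r.2.1 = []
    · simp [hc]
    · simp [hc, List.length_pos_iff]
  · rw [if_neg hl, if_pos (by omega)]
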